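-- pv_equiv track=rewrite | github.com/lockonZhang/Multi-Pyramid-TCM | MPTCM/Tools.py | Fusing
-- ===== SOURCE A (Python) =====
-- def Fusing(data_list, s):
--     # this function is the reverse of function:Cutting,it can put the data list
--     # with type of dt back to py.int and return it
--     z = 1  # 255 when dt==uint8
--     f = 1 * pow(2, s)
--     val = 0
--     for i in range(len(data_list)):
--         val += z * data_list[i]
--         z = z * f
--     return val
-- ===== SOURCE B (Python) =====
-- def Fusing(data_list, s):
--     # Horner's method over the digits from highest to lowest.
--     base = pow(2, s)
--     val = 0
--     for x in reversed(data_list):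
--         val = val * base + x
--     return val
-- ===== Notes on version B (the rewrite author's own statement) =====
-- stated objective: idiomatic
-- what changed: Replaces the low-to-high summation with a separate running power z by a single-accumulator Horner evaluation over the reversed digit list.
-- outside the precondition, e.g. on Fusing([1, 2], -1): A returns 2.0, B returns 2.0; on Fusing([5], -1): A returns 5, B returns 5.0
import Mathlib
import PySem

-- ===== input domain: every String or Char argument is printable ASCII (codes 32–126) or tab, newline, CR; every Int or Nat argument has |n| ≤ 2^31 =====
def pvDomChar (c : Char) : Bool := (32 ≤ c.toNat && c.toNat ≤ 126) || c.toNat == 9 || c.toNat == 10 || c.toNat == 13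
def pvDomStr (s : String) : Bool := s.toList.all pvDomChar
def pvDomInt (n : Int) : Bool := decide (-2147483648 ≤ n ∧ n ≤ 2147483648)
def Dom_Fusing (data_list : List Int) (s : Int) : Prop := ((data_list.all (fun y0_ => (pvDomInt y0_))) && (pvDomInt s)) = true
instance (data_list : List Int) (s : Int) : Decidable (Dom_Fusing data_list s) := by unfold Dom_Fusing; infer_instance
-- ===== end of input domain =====

-- B evaluates the digits by Horner's method over the reversed list (single accumulator)
-- instead of A's low-to-high sum with a separate running power; equal return values on Pre_.

-- ===== PORT A =====
-- A: z = 1; f = 2**s; val = 0; for each digit d: val += z*d; z *= f; return val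
def Fusing (data_list : List Int) (s : Int) : Int :=
  let f : Int := 1 * 2 ^ s.toNat
  (data_list.foldl (fun (st : Int × Int) d => (st.1 * f, st.2 + st.1 * d)) (1, 0)).2

-- ===== PORT B =====
-- B: base = 2**s; val = 0; for x in reversed(data_list): val = val*base + x; return val
def Fusing_alt (data_list : List Int) (s : Int) : Int :=
  let base : Int := 2 ^ s.toNat
  data_list.reverse.foldl (fun val x => val * base + x) 0

-- ===== PRECONDITION & SPEC =====
-- Pre_ excludes s < 0, on which pow(2, s) is a Python float and both programs leave
-- the declared int type (A returns a float whenever the list has at least two elements).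
def Pre_Fusing (data_list : List Int) (s : Int) : Prop := 0 ≤ s
instance (data_list : List Int) (s : Int) : Decidable (Pre_Fusing data_list s) := by unfold Pre_Fusing; infer_instance
def pvWitness_Fusing : List Int × Int := ([3, 5], 4)

def Spec_Fusing (data_list : List Int) (s : Int) (out : Int) : Prop := out = Fusing_alt data_list s
instance (data_list : List Int) (s : Int) (out : Int) : Decidable (Spec_Fusing data_list s out) := by unfold Spec_Fusing; infer_instance

-- ===== CLAIM =====
def Claim_equal_Fusing : Prop := ∀ (data_list : List Int) (s : Int), Dom_Fusing data_list s → Pre_Fusing data_list s → Spec_Fusing data_list s (Fusing data_list s)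

-- ===== LEMMAS AND PROOFS =====

-- Loop invariant: A's pair-state fold equals val + z · (Horner of l).
theorem fusing_fold_horner (f : Int) (l : List Int) (z val : Int) :
    (l.foldl (fun (st : Int × Int) d => (st.1 * f, st.2 + st.1 * d)) (z, val)).2
      = val + z * (l.reverse.foldl (fun v x => v * f + x) 0) := by
  induction l generalizing z val with
  | nil => simp
  | cons d t ih =>
      simp only [List.foldl_cons, List.reverse_cons, List.foldl_append, List.foldl_nil]
      rw [ih]
      ring

-- ===== VERDICT =====
theorem Fusing_spec : Claim_equal_Fusing := by
  intro data_list s _ _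
  unfold Spec_Fusing Fusing Fusing_alt
  simpa using fusing_fold_horner (2 ^ s.toNat) data_list 1 0
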